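-- pv_equiv track=rewrite | github.com/costa-group/grey | src/liveness/layout_generation.py | output_stack_layout
-- ===== SOURCE A (Python) =====
-- from typing import Dict, List, Type, Any, Set, Tuple, Optional
--
-- def output_stack_layout(input_stack: List[str], final_stack_elements: List[str],
--                         live_vars: Set[str], variable_depth_info: Dict[str, int]) -> List[str]:
--     """
--     Generates the output stack layout before and after the last instruction
--     (i.e. the one not optimized by the greedy algorithm), according to the variables
--     in live vars, the variables that must appear at the top of the stack and the information from the input stack
--     """
--
--     # We keep the variables in the input stack in the same order if they appear in the variable vars (so that we
--     # don't need to move them elsewhere). It might contain None variables if the corresponding variables are consumed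
--     # Variables can appear repeated in the input stack due to splitting in several instructions. Hence, we just want
--     # to keep a copy of each variable, the one that is deepest in the stack.
--     reversed_stack_relative_order = []
--     already_introduced = set()
--     for var_ in reversed(input_stack):
--         if var_ in live_vars and var_ not in already_introduced:
--             reversed_stack_relative_order.append(var_)
--             already_introduced.add(var_)
--         else:
--             reversed_stack_relative_order.append(None)
--
--     # We undo the reversed traversal
--     bottom_output_stack = list(reversed(reversed_stack_relative_order))
--
--     vars_to_place = live_vars.difference(set(final_stack_elements + bottom_output_stack))
--
--     # Sort the vars to place according to the variable depth info order in reversed order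
--     vars_to_place_sorted = sorted(vars_to_place, key=lambda x: -variable_depth_info[x])
--
--     # Try to place the variables in reversed order
--     i, j = len(bottom_output_stack) - 1, 0
--
--     while i >= 0 and j < len(vars_to_place_sorted):
--         if bottom_output_stack[i] is None:
--             bottom_output_stack[i] = vars_to_place_sorted[j]
--             j += 1
--         i -= 1
--
--     # First exit condition: all variables have been placed in between. Hence, I have to insert the remaining
--     # elements at the beginning
--     if i == -1:
--         bottom_output_stack = list(reversed(vars_to_place_sorted[j:])) + bottom_output_stack
--
--     # Second condition: all variables have been placed in between. There can be some None values in between that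
--     # must be removed
--     else:
--         bottom_output_stack = [var_ for var_ in bottom_output_stack if var_ is not None]
--
--     # The final stack elements must appear in the top of the stack
--     return final_stack_elements + bottom_output_stack
-- ===== SOURCE B (Python) =====
-- def output_stack_layout(input_stack, final_stack_elements, live_vars, variable_depth_info):
--     # Count the copies of every variable, then sweep forward decrementing the
--     # counts: a slot is kept exactly when it holds a live variable's final copy
--     # (no copies remain after it); every other slot becomes a hole (None).
--     remaining = {}
--     for v in input_stack:
--         remaining[v] = remaining.get(v, 0) + 1
--     masked = []
--     for v in input_stack:
--         remaining[v] = remaining[v] - 1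
--         masked.append(v if v in live_vars and remaining[v] == 0 else None)
--     # Variables still to be placed, shallowest (smallest depth) first.
--     queue = sorted((v for v in live_vars
--                     if v not in final_stack_elements and v not in remaining),
--                    key=lambda x: variable_depth_info[x])
--     # Arithmetic split: variables that do not fit into the holes overflow to the
--     # very bottom; the lowest unfillable holes are dropped; the remaining holes
--     # are filled in queue order in one forward pass.
--     holes = masked.count(None)
--     cut = max(len(queue) - holes, 0)
--     overflow, fills = queue[:cut], queue[cut:]
--     skip = holes - len(fills)
--     body, k = [], 0
--     for v in masked:
--         if v is not None:
--             body.append(v)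
--         elif skip > 0:
--             skip -= 1
--         else:
--             body.append(fills[k])
--             k += 1
--     return final_stack_elements + overflow + body
-- ===== Notes on version B (the rewrite author's own statement) =====
-- stated objective: alternative
-- what changed: A's reverse scan with a seen-set, descending-depth sort and backward two-pointer in-place fill with two distinct exit branches are replaced by a count-then-decrement forward sweep that keeps each live variable's final copy, an ascending-depth sort, and an arithmetic pre-computation of the overflow/skip/fill split consumed in one forward pass.
-- outside the precondition, e.g. on output_stack_layout(['?'], [], {'a', 'b'}, {'a': 1, 'b': 1}): A returns ['b', 'a'], B returns ['a', 'b']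
import Mathlib
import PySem

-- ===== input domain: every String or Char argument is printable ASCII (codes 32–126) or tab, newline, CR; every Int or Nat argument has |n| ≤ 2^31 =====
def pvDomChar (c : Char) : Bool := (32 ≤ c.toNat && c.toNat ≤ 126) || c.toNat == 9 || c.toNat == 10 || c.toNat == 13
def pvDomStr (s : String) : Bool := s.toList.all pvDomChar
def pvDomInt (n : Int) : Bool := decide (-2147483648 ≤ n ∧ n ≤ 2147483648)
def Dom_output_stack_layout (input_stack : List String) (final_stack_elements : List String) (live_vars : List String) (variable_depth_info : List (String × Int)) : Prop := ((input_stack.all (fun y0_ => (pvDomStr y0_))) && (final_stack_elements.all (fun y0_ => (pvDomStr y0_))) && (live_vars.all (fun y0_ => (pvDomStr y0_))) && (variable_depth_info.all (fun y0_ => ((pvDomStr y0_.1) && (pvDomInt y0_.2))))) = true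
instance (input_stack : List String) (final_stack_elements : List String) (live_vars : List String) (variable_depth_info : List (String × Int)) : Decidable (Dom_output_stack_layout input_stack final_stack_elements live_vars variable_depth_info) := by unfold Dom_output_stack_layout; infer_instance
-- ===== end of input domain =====

-- B replaces A's reverse-scan-with-seen-set, descending sort and backward two-pointer
-- in-place fill with two exit branches by a forward suffix-membership mask, an ascending
-- sort and an arithmetic overflow/skip split consumed in one forward pass
-- (objective: alternative; not claimed faster).

-- ===== PORT A =====
-- while-loop 'i, j' of A: the Nat k is Python's i + 1 (k = 0 is Python's i == -1);
-- bottom_output_stack is a List (Option String), None = Python's None.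
def pvFillA (vars : List String) : List (Option String) → Nat → Nat → (List (Option String) × Nat × Nat)
  | bos, 0, j => (bos, 0, j)
  | bos, k + 1, j =>
    if j < vars.length then
      if bos.getD k none = none then
        pvFillA vars (bos.set k (some (vars.getD j ""))) k (j + 1)
      else
        pvFillA vars bos k j
    else (bos, k + 1, j)

def output_stack_layout (input_stack : List String) (final_stack_elements : List String) (live_vars : List String) (variable_depth_info : List (String × Int)) : List String :=
  let d := PySem.Dict.ofList variable_depth_info
  -- reversed traversal appending to reversed_stack_relative_order, with already_introduced as a set
  let st := input_stack.reverse.foldl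
    (fun (p : List (Option String) × PySem.Set String) var_ =>
      if var_ ∈ live_vars ∧ var_ ∉ p.2 then (p.1 ++ [some var_], PySem.Set.add p.2 var_)
      else (p.1 ++ [none], p.2)) ([], PySem.Set.empty)
  let bottom_output_stack := st.1.reverse
  -- live_vars.difference(set(final_stack_elements + bottom_output_stack)); live_vars is the set
  let vars_to_place := live_vars.filter (fun v => ¬ (v ∈ final_stack_elements ∨ some v ∈ bottom_output_stack))
  -- sorted(vars_to_place, key=lambda x: -variable_depth_info[x]); Pre_ guarantees the key exists
  let vars_to_place_sorted := PySem.List.sorted vars_to_place (fun x => -(PySem.Dict.getD d x 0))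
  let r := pvFillA vars_to_place_sorted bottom_output_stack bottom_output_stack.length 0
  if r.2.1 = 0 then
    -- 'list(reversed(vars_to_place_sorted[j:])) + bottom_output_stack'; in this branch the loop
    -- has filled every None slot, so filterMap id is exactly Python's list of strings here
    final_stack_elements ++ (((vars_to_place_sorted.drop r.2.2).reverse.map some) ++ r.1).filterMap id
  else
    -- '[var_ for var_ in bottom_output_stack if var_ is not None]'
    final_stack_elements ++ r.1.filterMap id

-- ===== PORT B =====
def output_stack_layout_alt (input_stack : List String) (final_stack_elements : List String) (live_vars : List String) (variable_depth_info : List (String × Int)) : List String :=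
  let d := PySem.Dict.ofList variable_depth_info
  -- 'remaining = {}; for v in input_stack: remaining[v] = remaining.get(v, 0) + 1'
  let remaining0 := input_stack.foldl
    (fun (r : PySem.Dict String Int) v => r.insert v (r.getD v 0 + 1)) PySem.Dict.empty
  -- 'for v in input_stack: remaining[v] = remaining[v] - 1; masked.append(…)'
  -- (remaining[v] always exists here, so getD's default 0 is never read)
  let sweep := input_stack.foldl
    (fun (p : PySem.Dict String Int × List (Option String)) v =>
      let r := p.1.insert v (p.1.getD v 0 - 1)
      (r, p.2 ++ [if v ∈ live_vars ∧ r.getD v 0 = 0 then some v else none]))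
    (remaining0, ([] : List (Option String)))
  let masked := sweep.2
  -- sorted((v for v in live_vars if v not in final_stack_elements and v not in remaining),
  --        key=lambda x: variable_depth_info[x]); Pre_ guarantees the key exists
  let queue := PySem.List.sorted
    (live_vars.filter (fun v => v ∉ final_stack_elements ∧ ¬ sweep.1.contains v))
    (fun x => PySem.Dict.getD d x 0)
  let holes : Int := PySem.List.count masked none
  let cut : Int := max ((queue.length : Int) - holes) 0
  -- queue[:cut] and queue[cut:]
  let overflow := PySem.List.slice queue none (some cut)
  let fills := PySem.List.slice queue (some cut) none
  -- 'for v in masked: …' building body with the counters skip and k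
  let st := masked.foldl
    (fun (st : List String × Int × Nat) v =>
      match v with
      | some w => (st.1 ++ [w], st.2.1, st.2.2)
      | none =>
        if st.2.1 > 0 then (st.1, st.2.1 - 1, st.2.2)
        else (st.1 ++ [fills.getD st.2.2 ""], st.2.1, st.2.2 + 1))
    ([], holes - fills.length, 0)
  final_stack_elements ++ overflow ++ st.1

-- ===== PRECONDITION & SPEC =====
-- Pre_ excludes (a) inputs where a variable to be placed is missing from variable_depth_info
-- (Python A raises KeyError there, and so does B) and (b) inputs where two variables to be
-- placed share the same depth: there Python's result depends on the accidental iteration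
-- order of the set vars_to_place, which the ordered-list model cannot reproduce.
def Pre_output_stack_layout (input_stack : List String) (final_stack_elements : List String) (live_vars : List String) (variable_depth_info : List (String × Int)) : Prop :=
  (∀ v ∈ live_vars.filter (fun v => v ∉ final_stack_elements ∧ v ∉ input_stack),
      (PySem.Dict.get? (PySem.Dict.ofList variable_depth_info) v).isSome) ∧
  ((live_vars.filter (fun v => v ∉ final_stack_elements ∧ v ∉ input_stack)).map
      (fun v => PySem.Dict.getD (PySem.Dict.ofList variable_depth_info) v 0)).Nodup
instance (input_stack : List String) (final_stack_elements : List String) (live_vars : List String) (variable_depth_info : List (String × Int)) : Decidable (Pre_output_stack_layout input_stack final_stack_elements live_vars variable_depth_info) := by unfold Pre_output_stack_layout; infer_instance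

def pvWitness_output_stack_layout : List String × List String × List String × (List (String × Int)) :=
  (["a", "b"], ["c"], ["a", "d"], [("d", 1)])

def Spec_output_stack_layout (input_stack : List String) (final_stack_elements : List String) (live_vars : List String) (variable_depth_info : List (String × Int)) (out : List String) : Prop := out = output_stack_layout_alt input_stack final_stack_elements live_vars variable_depth_info
instance (input_stack : List String) (final_stack_elements : List String) (live_vars : List String) (variable_depth_info : List (String × Int)) (out : List String) : Decidable (Spec_output_stack_layout input_stack final_stack_elements live_vars variable_depth_info out) := by unfold Spec_output_stack_layout; infer_instance

-- ===== CLAIM (what is proved, stated in full; the proofs are below) =====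
def Claim_equal_output_stack_layout : Prop := ∀ (input_stack : List String) (final_stack_elements : List String) (live_vars : List String) (variable_depth_info : List (String × Int)), Dom_output_stack_layout input_stack final_stack_elements live_vars variable_depth_info → Pre_output_stack_layout input_stack final_stack_elements live_vars variable_depth_info → Spec_output_stack_layout input_stack final_stack_elements live_vars variable_depth_info (output_stack_layout input_stack final_stack_elements live_vars variable_depth_info)

-- ===== LEMMAS AND PROOFS =====

-- the common mask, as a structural recursion: keep v iff it is live and does not occur later
def pvMaskB (live : List String) : List String → List (Option String)
  | [] => []
  | v :: rest => (if v ∈ live ∧ v ∉ rest then some v else none) :: pvMaskB live rest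

-- A's masking pass, rewritten with an explicit list 'prev' of ALL processed elements
-- (A's seen-set only records the kept ones; the two agree on live variables).
def pvMaskP (live : List String) (prev : List String) : List String → List (Option String)
  | [] => []
  | v :: rest => (if v ∈ live ∧ v ∉ prev then some v else none) :: pvMaskP live (v :: prev) rest

theorem pvMaskA_foldl_eq (live : List String) (l : List String) :
    ∀ (acc : List (Option String)) (seen prev : List String),
    (∀ v, v ∈ live → (v ∈ seen ↔ v ∈ prev)) →
    (l.foldl (fun (p : List (Option String) × PySem.Set String) var_ =>
        if var_ ∈ live ∧ var_ ∉ p.2 then (p.1 ++ [some var_], PySem.Set.add p.2 var_)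
        else (p.1 ++ [none], p.2)) (acc, seen)).1 = acc ++ pvMaskP live prev l := by
  induction l with
  | nil => intro acc seen prev h; simp [pvMaskP]
  | cons v rest ih =>
    intro acc seen prev h
    rw [List.foldl_cons, pvMaskP]
    by_cases hv : v ∈ live
    · by_cases hs : v ∈ seen
      · have hp : v ∈ prev := (h v hv).1 hs
        have hc1 : ¬ (v ∈ live ∧ v ∉ seen) := by tauto
        have hc2 : ¬ (v ∈ live ∧ v ∉ prev) := by tauto
        rw [if_neg hc1, if_neg hc2, ih (acc ++ [none]) seen (v :: prev) ?_]
        · simp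
        · intro w hw; rw [h w hw]; constructor
          · intro hwp; exact List.mem_cons_of_mem _ hwp
          · intro hwp; rcases List.mem_cons.1 hwp with rfl | hwp
            · exact hp
            · exact hwp
      · have hp : v ∉ prev := fun hc => hs ((h v hv).2 hc)
        rw [if_pos ⟨hv, hs⟩, if_pos ⟨hv, hp⟩,
          ih (acc ++ [some v]) (PySem.Set.add seen v) (v :: prev) ?_]
        · simp
        · intro w hw
          rw [List.mem_cons]
          constructor
          · intro hws
            rcases (PySem.Set.mem_add _ _ _).1 hws with h1 | h1
            · exact Or.inr ((h w hw).1 h1)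
            · exact Or.inl h1
          · intro hws
            rcases hws with rfl | h1
            · exact (PySem.Set.mem_add _ _ _).2 (Or.inr rfl)
            · exact (PySem.Set.mem_add _ _ _).2 (Or.inl ((h w hw).2 h1))
    · have hc1 : ¬ (v ∈ live ∧ v ∉ seen) := by tauto
      have hc2 : ¬ (v ∈ live ∧ v ∉ prev) := by tauto
      rw [if_neg hc1, if_neg hc2, ih (acc ++ [none]) seen (v :: prev) ?_]
      · simp
      · intro w hw; rw [h w hw]
        constructor
        · intro hwp; exact List.mem_cons_of_mem _ hwp
        · intro hwp; rcases List.mem_cons.1 hwp with rfl | hwp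
          · exact absurd hw hv
          · exact hwp

-- pvMaskB generalized by an extra suffix of already-processed elements
def pvMaskS (live : List String) (prev : List String) : List String → List (Option String)
  | [] => []
  | v :: rest => (if v ∈ live ∧ (v ∉ rest ∧ v ∉ prev) then some v else none) :: pvMaskS live prev rest

theorem pvMaskP_append (live : List String) (a : List String) :
    ∀ (prev b : List String),
    pvMaskP live prev (a ++ b) = pvMaskP live prev a ++ pvMaskP live (a.reverse ++ prev) b := by
  induction a with
  | nil => intro prev b; simp [pvMaskP]
  | cons v a' ih =>
    intro prev b
    rw [List.cons_append, pvMaskP, pvMaskP, ih (v :: prev) b]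
    simp

theorem pvMaskP_reverse (live : List String) (l : List String) :
    ∀ prev, (pvMaskP live prev l.reverse).reverse = pvMaskS live prev l := by
  induction l with
  | nil => intro prev; simp [pvMaskP, pvMaskS]
  | cons v rest ih =>
    intro prev
    rw [pvMaskS, List.reverse_cons, pvMaskP_append]
    simp only [List.reverse_reverse, pvMaskP, List.reverse_append]
    rw [← ih prev]
    simp [List.mem_append, not_or]

theorem pvMaskS_nil_eq_maskB (live : List String) (l : List String) :
    pvMaskS live [] l = pvMaskB live l := by
  induction l with
  | nil => rfl
  | cons v rest ih => rw [pvMaskS, pvMaskB, ih]; simp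

-- B's decrement sweep writes the last-occurrence mask: a slot is kept exactly when
-- no copies of its (live) variable remain in the suffix
theorem pvSweep_mask (live : List String) :
    ∀ (l : List String) (d : PySem.Dict String Int) (acc : List (Option String)),
    (∀ v ∈ l, PySem.Dict.getD d v 0 = (l.count v : Int)) →
    ((l.foldl
      (fun (p : PySem.Dict String Int × List (Option String)) v =>
        (p.1.insert v (p.1.getD v 0 - 1),
         p.2 ++ [if v ∈ live ∧ (p.1.insert v (p.1.getD v 0 - 1)).getD v 0 = 0
                 then some v else none]))
      (d, acc)).2) = acc ++ pvMaskB live l := by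
  intro l
  induction l with
  | nil => intro d acc h; simp [pvMaskB]
  | cons x rest ih =>
    intro d acc h
    rw [List.foldl_cons]
    have hx := h x (List.mem_cons_self ..)
    have hcc : (x :: rest).count x = rest.count x + 1 := by simp
    have hxr : PySem.Dict.getD (d.insert x (PySem.Dict.getD d x 0 - 1)) x 0
        = (rest.count x : Int) := by
      rw [PySem.Dict.getD_insert_self, hx, hcc]
      push_cast
      ring
    have hinv : ∀ v ∈ rest,
        PySem.Dict.getD (d.insert x (PySem.Dict.getD d x 0 - 1)) v 0 = (rest.count v : Int) := by
      intro v hv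
      by_cases hvx : v = x
      · subst hvx; exact hxr
      · rw [PySem.Dict.getD_insert, if_neg hvx, h v (List.mem_cons_of_mem _ hv)]
        have hxv : ¬ x = v := fun hc => hvx hc.symm
        simp [hxv]
    rw [ih _ _ hinv, pvMaskB]
    simp only [hxr, Nat.cast_eq_zero, List.count_eq_zero]
    simp

-- the sweep's final dict contains exactly the processed variables (beyond d's keys)
theorem pvSweep_contains (live : List String) :
    ∀ (l : List String) (d : PySem.Dict String Int) (acc : List (Option String)) (w : String),
    PySem.Dict.contains ((l.foldl
      (fun (p : PySem.Dict String Int × List (Option String)) v =>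
        (p.1.insert v (p.1.getD v 0 - 1),
         p.2 ++ [if v ∈ live ∧ (p.1.insert v (p.1.getD v 0 - 1)).getD v 0 = 0
                 then some v else none]))
      (d, acc)).1) w = (PySem.Dict.contains d w || decide (w ∈ l)) := by
  intro l
  induction l with
  | nil => intro d acc w; simp
  | cons x rest ih =>
    intro d acc w
    rw [List.foldl_cons, ih]
    rw [PySem.Dict.contains_insert]
    have hbd : (w == x) = decide (w = x) := by
      by_cases hwx : w = x
      · simp [hwx]
      · simp [hwx]
    simp [List.mem_cons, Bool.or_comm, Bool.or_assoc, Bool.or_left_comm, hbd]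

-- a live variable is kept somewhere iff it occurs in the stack
theorem mem_pvMaskB (live : List String) (v : String) (hv : v ∈ live) :
    ∀ l : List String, (some v ∈ pvMaskB live l ↔ v ∈ l) := by
  intro l
  induction l with
  | nil => simp [pvMaskB]
  | cons w rest ih =>
    simp only [pvMaskB, List.mem_cons]
    constructor
    · rintro (h | h)
      · by_cases hc : w ∈ live ∧ w ∉ rest
        · rw [if_pos hc] at h
          exact Or.inl (Option.some.inj h.symm).symm
        · rw [if_neg hc] at h; simp at h
      · exact Or.inr (ih.1 h)
    · rintro (rfl | h)
      · by_cases hr : v ∈ rest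
        · exact Or.inr (ih.2 hr)
        · exact Or.inl (by rw [if_pos ⟨hv, hr⟩])
      · exact Or.inr (ih.2 h)

-- sorting by the negated key is the reverse of sorting by the key, when the keys are distinct
theorem sorted_neg_reverse (F : List String) (key : String → Int)
    (hnd : (F.map key).Nodup) :
    PySem.List.sorted F key false = (PySem.List.sorted F (fun x => -key x) false).reverse := by
  apply PySem.List.sorted_eq_of_perm_of_pairwise_lt
  · exact (List.reverse_perm _).trans (PySem.List.sorted_perm F _ false)
  · have h1 : (PySem.List.sorted F (fun x => -key x) false).Pairwise
        (fun a b => -key a ≤ -key b) := PySem.List.sorted_pairwise F _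
    have hmap : ((PySem.List.sorted F (fun x => -key x) false).map key).Nodup :=
      ((PySem.List.sorted_perm F _ false).map key).nodup_iff.mpr hnd
    have h2 : (PySem.List.sorted F (fun x => -key x) false).Pairwise
        (fun a b => key a ≠ key b) := by
      rw [List.Nodup, List.pairwise_map] at hmap
      exact hmap
    rw [List.pairwise_reverse]
    exact (h1.and h2).imp (by intro a b ⟨hle, hne⟩; omega)

-- the backward fill scan (bridge between A's while loop and B's forward pass)
def pvFillB (vars : List String) : List (Option String) → Nat → (List String × Nat)
  | [], k => ([], k)
  | some v :: rest, k => let p := pvFillB vars rest k; (v :: p.1, p.2)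
  | none :: rest, k =>
    if k < vars.length then
      let p := pvFillB vars rest (k + 1); (vars.getD k "" :: p.1, p.2)
    else pvFillB vars rest k

-- carrying a fixed last slot through A's fill loop (the loop never reaches index ys.length)
theorem pvFillA_append (vars : List String) :
    ∀ (k : Nat) (ys : List (Option String)) (x : Option String) (j : Nat), k ≤ ys.length →
    pvFillA vars (ys ++ [x]) k j =
      ((pvFillA vars ys k j).1 ++ [x], (pvFillA vars ys k j).2) := by
  intro k
  induction k with
  | zero => intro ys x j _; simp [pvFillA]
  | succ k ih =>
    intro ys x j hk
    rw [pvFillA, pvFillA]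
    by_cases hj : j < vars.length
    · rw [if_pos hj, if_pos hj]
      have hkl : k < ys.length := hk
      rw [List.getD_append ys [x] none k hkl]
      by_cases hn : ys.getD k none = none
      · rw [if_pos hn, if_pos hn, List.set_append_left k _ hkl,
          ih (ys.set k (some (vars.getD j ""))) x (j + 1) (by simpa using le_of_lt hkl)]
      · rw [if_neg hn, if_neg hn, ih ys x j (le_of_lt hkl)]
    · rw [if_neg hj, if_neg hj]

theorem pvFillB_of_ge (vars : List String) :
    ∀ (r : List (Option String)) (j : Nat), ¬ j < vars.length →
    pvFillB vars r j = (r.filterMap id, j) := by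
  intro r
  induction r with
  | nil => intro j h; simp [pvFillB]
  | cons o rest ih =>
    intro j h
    cases o with
    | some v => rw [pvFillB, ih j h]; simp
    | none => rw [pvFillB, if_neg h, ih j h]; simp

theorem pvFill_main (vars : List String) :
    ∀ (bos : List (Option String)) (j : Nat), j ≤ vars.length →
    (let r := pvFillA vars bos bos.length j;
      if r.2.1 = 0 then (((vars.drop r.2.2).reverse.map some) ++ r.1).filterMap id
      else r.1.filterMap id) =
    (let p := pvFillB vars bos.reverse j; (vars.drop p.2).reverse ++ p.1.reverse) := by
  have main : ∀ (r : List (Option String)) (j : Nat), j ≤ vars.length →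
      (let rr := pvFillA vars r.reverse r.reverse.length j;
        if rr.2.1 = 0 then (((vars.drop rr.2.2).reverse.map some) ++ rr.1).filterMap id
        else rr.1.filterMap id) =
      (let p := pvFillB vars r j; (vars.drop p.2).reverse ++ p.1.reverse) := by
    intro r
    induction r with
    | nil =>
      intro j hj
      simp [pvFillA, pvFillB, - List.map_drop]
    | cons o r' ih =>
      intro j hj
      simp only [List.reverse_cons]
      by_cases hj' : j < vars.length
      · -- one step of the A loop at index r'.length
        have hlen : (r'.reverse ++ [o]).length = r'.reverse.length + 1 := by simp
        rw [hlen, pvFillA, if_pos hj']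
        have hget : (r'.reverse ++ [o]).getD r'.reverse.length none = o := by
          simp [List.getD]
        rw [hget]
        cases o with
        | some w =>
          have hne : (some w : Option String) ≠ none := by simp
          rw [if_neg hne, pvFillA_append vars r'.reverse.length r'.reverse (some w) j (le_refl _)]
          have := ih j hj
          simp only at this ⊢
          rw [pvFillB]
          simp only [List.length_reverse] at this ⊢
          by_cases h0 : (pvFillA vars r'.reverse r'.length j).2.1 = 0
          · rw [if_pos h0] at this ⊢
            simp only [List.filterMap_append, id_eq, List.filterMap_cons,
              List.filterMap_nil] at this ⊢
            rw [List.reverse_cons, ← List.append_assoc, this, List.append_assoc]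
          · rw [if_neg h0] at this ⊢
            simp only [List.filterMap_append, id_eq, List.filterMap_cons,
              List.filterMap_nil] at this ⊢
            rw [List.reverse_cons, this, List.append_assoc]
        | none =>
          rw [if_pos rfl]
          have hset : (r'.reverse ++ [none]).set r'.reverse.length (some (vars.getD j "")) =
              r'.reverse ++ [some (vars.getD j "")] := by
            rw [List.set_append_right _ _ (le_refl _)]; simp
          rw [hset, pvFillA_append vars r'.reverse.length r'.reverse _ (j + 1) (le_refl _)]
          have := ih (j + 1) hj'
          simp only at this ⊢
          rw [pvFillB, if_pos hj']
          simp only [List.length_reverse] at this ⊢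
          by_cases h0 : (pvFillA vars r'.reverse r'.length (j + 1)).2.1 = 0
          · rw [if_pos h0] at this ⊢
            simp only [List.filterMap_append, id_eq, List.filterMap_cons,
              List.filterMap_nil] at this ⊢
            rw [List.reverse_cons, ← List.append_assoc, this, List.append_assoc]
          · rw [if_neg h0] at this ⊢
            simp only [List.filterMap_append, id_eq, List.filterMap_cons,
              List.filterMap_nil] at this ⊢
            rw [List.reverse_cons, this, List.append_assoc]
      · -- j = vars.length: A's loop exits immediately, B just filters
        have hj0 : j = vars.length := le_antisymm hj (not_lt.1 hj')
        have hlen : (r'.reverse ++ [o]).length = r'.reverse.length + 1 := by simp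
        rw [hlen, pvFillA, if_neg hj']
        rw [pvFillB_of_ge vars (o :: r') j hj']
        cases o <;>
          simp [List.drop_eq_nil_of_le (le_of_eq hj0.symm), List.filterMap_reverse]
  intro bos j hj
  have := main bos.reverse j hj
  simpa using this

-- B's forward pass, as a structural recursion
def pvForw (fills : List String) : List (Option String) → Int → Nat → List String
  | [], _, _ => []
  | some v :: r, skip, k => v :: pvForw fills r skip k
  | none :: r, skip, k =>
    if 0 < skip then pvForw fills r (skip - 1) k
    else fills.getD k "" :: pvForw fills r skip (k + 1)

theorem pvForw_shift (x : String) (fl : List String) :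
    ∀ (s : List (Option String)) (skip : Int) (k : Nat),
    pvForw (x :: fl) s skip (k + 1) = pvForw fl s skip k := by
  intro s
  induction s with
  | nil => intro skip k; rfl
  | cons o r ih =>
    intro skip k
    cases o with
    | some v => simp only [pvForw, ih]
    | none =>
      simp only [pvForw]
      split_ifs with h
      · exact ih _ _
      · rw [List.getD_cons_succ, ih]

-- appending a slot at the bottom of the backward scan's input
theorem pvFillB_append_some (P : List String) (w : String) :
    ∀ (t : List (Option String)) (j : Nat),
    pvFillB P (t ++ [some w]) j = ((pvFillB P t j).1 ++ [w], (pvFillB P t j).2) := by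
  intro t
  induction t with
  | nil => intro j; simp [pvFillB]
  | cons o t' iht =>
    intro j
    cases o with
    | some v => simp [pvFillB, iht]
    | none => by_cases h : j < P.length <;> simp [pvFillB, iht, h]

theorem pvFillB_append_none (P : List String) :
    ∀ (t : List (Option String)) (j : Nat),
    pvFillB P (t ++ [none]) j =
      (if (pvFillB P t j).2 < P.length
       then ((pvFillB P t j).1 ++ [P.getD (pvFillB P t j).2 ""], (pvFillB P t j).2 + 1)
       else pvFillB P t j) := by
  intro t
  induction t with
  | nil => intro j; simp [pvFillB]
  | cons o t' iht =>
    intro j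
    cases o with
    | some v =>
      simp only [List.cons_append, pvFillB]
      rw [iht j]
      by_cases h2 : (pvFillB P t' j).2 < P.length <;> simp [h2]
    | none =>
      simp only [List.cons_append, pvFillB]
      by_cases h : j < P.length
      · rw [if_pos h, if_pos h, iht (j + 1)]
        by_cases h2 : (pvFillB P t' (j + 1)).2 < P.length <;> simp [h2]
      · rw [if_neg h, if_neg h]
        exact iht j

-- the backward scan consuming P from the front equals the forward pass with the
-- arithmetic split: k consumed = min(holes, remaining), fills reversed, extra holes skipped
theorem pvFillB_eq_forw (P : List String) :
    ∀ (s : List (Option String)) (j : Nat), j ≤ P.length →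
    pvFillB P s.reverse j =
      ((pvForw (((P.drop j).take (min (s.count none) (P.length - j))).reverse) s
          ((s.count none : Int) - (min (s.count none) (P.length - j))) 0).reverse,
        j + min (s.count none) (P.length - j)) := by
  intro s
  induction s with
  | nil => intro j hj; simp [pvFillB, pvForw]
  | cons o s' ih =>
    intro j hj
    have IH := ih j hj
    cases o with
    | some w =>
      have hcnt : ((some w : Option String) :: s').count none = s'.count none := by
        simp
      rw [List.reverse_cons]
      rw [pvFillB_append_some P w s'.reverse j, IH, hcnt]
      simp [pvForw]
    | none =>
      have hcnt : ((none : Option String) :: s').count none = s'.count none + 1 := by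
        simp
      rw [List.reverse_cons]
      rw [pvFillB_append_none P s'.reverse j, IH, hcnt]
      by_cases hcond : j + min (s'.count none) (P.length - j) < P.length
      · have hk'm : min (s'.count none) (P.length - j) = s'.count none := by omega
        have hknew : min (s'.count none + 1) (P.length - j) = s'.count none + 1 := by omega
        rw [if_pos hcond, hknew, hk'm]
        have hidx : j + s'.count none < P.length := by omega
        have htake : (P.drop j).take (s'.count none + 1)
            = (P.drop j).take (s'.count none) ++ [P[j + s'.count none]] := by
          rw [List.take_add_one]
          have hlt : s'.count none < (P.drop j).length := by simp; omega
          simp [List.getElem?_eq_getElem hlt]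
        have hforw :
            pvForw (((P.drop j).take (s'.count none + 1)).reverse) (none :: s')
              (((s'.count none + 1 : Nat) : Int) - ((s'.count none + 1 : Nat) : Int)) 0
            = P[j + s'.count none] :: pvForw (((P.drop j).take (s'.count none)).reverse) s'
                ((s'.count none : Int) - ((s'.count none : Nat) : Int)) 0 := by
          rw [htake, List.reverse_append, List.reverse_singleton]
          simp only [pvForw, List.singleton_append]
          rw [if_neg (by omega)]
          simp only [List.getD_cons_zero]
          rw [pvForw_shift]
          have hz : ((s'.count none + 1 : Nat) : Int) - ((s'.count none + 1 : Nat) : Int)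
              = (s'.count none : Int) - ((s'.count none : Nat) : Int) := by omega
          rw [hz]
        rw [hforw]
        simp
        exact ⟨by simp [List.getElem?_eq_getElem hidx], by omega⟩
      · have hk'L : min (s'.count none) (P.length - j) = P.length - j := by omega
        have hknew : min (s'.count none + 1) (P.length - j) = min (s'.count none) (P.length - j) := by omega
        rw [if_neg (by omega), hknew]
        have hforw :
            pvForw (((P.drop j).take (min (s'.count none) (P.length - j))).reverse) (none :: s')
              (((s'.count none + 1 : Nat) : Int) - ((min (s'.count none) (P.length - j) : Nat) : Int)) 0
            = pvForw (((P.drop j).take (min (s'.count none) (P.length - j))).reverse) s'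
                ((s'.count none : Int) - ((min (s'.count none) (P.length - j) : Nat) : Int)) 0 := by
          simp only [pvForw]
          rw [if_pos (by omega)]
          have hz : (((s'.count none + 1 : Nat) : Int) - ((min (s'.count none) (P.length - j) : Nat) : Int)) - 1
              = (s'.count none : Int) - ((min (s'.count none) (P.length - j) : Nat) : Int) := by omega
          rw [hz]
        rw [hforw]

-- B's foldl loop is the forward pass
theorem foldl_fill_eq_forw (fills : List String) :
    ∀ (masked : List (Option String)) (acc : List String) (skip : Int) (k : Nat),
    (masked.foldl
      (fun (st : List String × Int × Nat) v =>
        match v with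
        | some w => (st.1 ++ [w], st.2.1, st.2.2)
        | none =>
          if st.2.1 > 0 then (st.1, st.2.1 - 1, st.2.2)
          else (st.1 ++ [fills.getD st.2.2 ""], st.2.1, st.2.2 + 1))
      (acc, skip, k)).1 = acc ++ pvForw fills masked skip k := by
  intro masked
  induction masked with
  | nil => intro acc skip k; simp [pvForw]
  | cons o r ih =>
    intro acc skip k
    cases o with
    | some v => rw [List.foldl_cons]; simp only [pvForw]; rw [ih]; simp
    | none =>
      rw [List.foldl_cons]
      simp only [pvForw, gt_iff_lt]
      split_ifs with h
      · rw [ih]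
      · rw [ih]; simp

-- reverse slices of a list
theorem take_reverse_eq (P : List String) (k : Nat) (hk : k ≤ P.length) :
    P.reverse.take (P.length - k) = (P.drop k).reverse := by
  rw [List.take_reverse]
  have h : P.length - (P.length - k) = k := by omega
  rw [h]

theorem drop_reverse_eq (P : List String) (k : Nat) (hk : k ≤ P.length) :
    P.reverse.drop (P.length - k) = (P.take k).reverse := by
  rw [List.drop_reverse]
  have h : P.length - (P.length - k) = k := by omega
  rw [h]

-- ===== VERDICT (by name: the statement is the Claim_ definition above) =====
theorem output_stack_layout_spec : Claim_equal_output_stack_layout := by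
  intro input_stack final_stack_elements live_vars variable_depth_info _ hpre
  unfold Spec_output_stack_layout
  simp only [output_stack_layout, output_stack_layout_alt]
  -- phase 1: A's reversed scan and B's comprehension both produce the last-occurrence mask
  have hmaskA :
      (input_stack.reverse.foldl
        (fun (p : List (Option String) × PySem.Set String) var_ =>
          if var_ ∈ live_vars ∧ var_ ∉ p.2 then (p.1 ++ [some var_], PySem.Set.add p.2 var_)
          else (p.1 ++ [none], p.2)) ([], PySem.Set.empty)).1.reverse
        = pvMaskB live_vars input_stack := by
    rw [pvMaskA_foldl_eq live_vars input_stack.reverse [] PySem.Set.empty []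
          (by intro v _; simp [PySem.Set.empty])]
    rw [List.nil_append, pvMaskP_reverse, pvMaskS_nil_eq_maskB]
  -- B's first loop is Counter(input_stack), so its sweep starts from the true counts
  have hbase : ∀ v ∈ input_stack,
      PySem.Dict.getD (input_stack.foldl
        (fun (r : PySem.Dict String Int) v => r.insert v (r.getD v 0 + 1)) PySem.Dict.empty) v 0
      = (input_stack.count v : Int) := by
    intro v _
    rw [PySem.Dict.foldl_insert_getD_add_one_eq_counter, PySem.Dict.getD_counter]
  have hmaskB := pvSweep_mask live_vars input_stack _ [] hbase
  rw [List.nil_append] at hmaskB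
  rw [hmaskA, hmaskB]
  -- phase 2: the two filters coincide, and the two sorts are reverses of each other
  have hfilter :
      live_vars.filter
        (fun v => ¬ (v ∈ final_stack_elements ∨ some v ∈ pvMaskB live_vars input_stack))
      = live_vars.filter
        (fun v => v ∉ final_stack_elements ∧ v ∉ input_stack) := by
    apply List.filter_congr
    intro v hv
    simp [mem_pvMaskB live_vars v hv input_stack, not_or]
  have hfilterB :
      live_vars.filter
        (fun v => v ∉ final_stack_elements ∧
          ¬ PySem.Dict.contains ((input_stack.foldl
            (fun (p : PySem.Dict String Int × List (Option String)) v =>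
              (p.1.insert v (p.1.getD v 0 - 1),
               p.2 ++ [if v ∈ live_vars ∧ (p.1.insert v (p.1.getD v 0 - 1)).getD v 0 = 0
                       then some v else none]))
            (input_stack.foldl
              (fun (r : PySem.Dict String Int) v => r.insert v (r.getD v 0 + 1))
              PySem.Dict.empty, ([] : List (Option String)))).1) v)
      = live_vars.filter
        (fun v => v ∉ final_stack_elements ∧ v ∉ input_stack) := by
    apply List.filter_congr
    intro v _
    rw [pvSweep_contains, PySem.Dict.foldl_insert_getD_add_one_eq_counter,
      PySem.Dict.contains_counter]
    simp
  rw [hfilter, hfilterB]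
  set d := PySem.Dict.ofList variable_depth_info with hd
  set F := live_vars.filter (fun v => v ∉ final_stack_elements ∧ v ∉ input_stack) with hF
  set P := PySem.List.sorted F (fun x => -(PySem.Dict.getD d x 0)) false with hP
  set Q := PySem.List.sorted F (fun x => PySem.Dict.getD d x 0) false with hQ
  have hQP : Q = P.reverse := by
    rw [hQ, hP]
    exact sorted_neg_reverse F (fun x => PySem.Dict.getD d x 0) hpre.2
  set masked := pvMaskB live_vars input_stack with hmaskdef
  -- phase 3: A's while loop (via the backward scan) equals B's arithmetic forward pass
  set m := masked.count none with hm
  set L := P.length with hL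
  set k := min m L with hk
  have hkL : k ≤ L := by omega
  have hmain := pvFill_main P masked 0 (Nat.zero_le _)
  simp only at hmain
  rw [← apply_ite (fun l => final_stack_elements ++ l), hmain]
  have hfill := pvFillB_eq_forw P masked 0 (Nat.zero_le _)
  simp only [Nat.sub_zero, List.drop_zero, Nat.zero_add, ← hm, ← hL, ← hk] at hfill
  rw [hfill]
  -- identify B's cut/overflow/fills/skip with the A-side quantities
  have hQlen : Q.length = L := by rw [hQP]; simp [hL]
  have hcut : max ((Q.length : Int) - (PySem.List.count masked none : Int)) 0
      = ((L - k : Nat) : Int) := by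
    rw [hQlen, PySem.List.count_eq, ← hm]
    omega
  rw [hcut, PySem.List.slice_to_natCast, PySem.List.slice_from_natCast]
  rw [hQP, take_reverse_eq P k hkL, drop_reverse_eq P k hkL]
  have hfl : ((P.take k).reverse).length = k := by simp; omega
  rw [foldl_fill_eq_forw, List.nil_append]
  have hskip : (PySem.List.count masked none : Int) - (((P.take k).reverse).length : Int)
      = ((m : Nat) : Int) - (k : Nat) := by
    rw [PySem.List.count_eq, ← hm, hfl]
  rw [hskip]
  simp [List.append_assoc]
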